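-- pv_equiv track=rewrite | github.com/URI-ABD/clam | pypi/results/cakes/python/py_cakes/wrangling_logs.py | clusters_by_depth
-- ===== SOURCE A (Python) =====
-- def clusters_by_depth(
--     clusters: list[tuple[bool, int, int]],
-- ) -> list[tuple[int, tuple[tuple[int, int], tuple[int, int]]]]:
--     """Count the number of clusters by depth."""
--     depth_counts: dict[int, tuple[tuple[int, int], tuple[int, int]]] = {}
--
--     for status, depth, cardinality in clusters:
--         (s_freq, s_count), (f_freq, f_count) = depth_counts.get(depth, ((0, 0), (0, 0)))
--         if status:
--             f_freq += 1
--             f_count += cardinality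
--         else:
--             s_freq += 1
--             s_count += cardinality
--         depth_counts[depth] = (s_freq, s_count), (f_freq, f_count)
--
--     return sorted(depth_counts.items())
-- ===== SOURCE B (Python) =====
-- def clusters_by_depth(
--     clusters: list[tuple[bool, int, int]],
-- ) -> list[tuple[int, tuple[tuple[int, int], tuple[int, int]]]]:
--     """Count the number of clusters by depth."""
--     depths = sorted({depth for _, depth, _ in clusters})
--     result = []
--     for d in depths:
--         s_freq = s_count = f_freq = f_count = 0
--         for status, depth, cardinality in clusters:
--             if depth == d:
--                 if status:
--                     f_freq += 1
--                     f_count += cardinality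
--                 else:
--                     s_freq += 1
--                     s_count += cardinality
--         result.append((d, ((s_freq, s_count), (f_freq, f_count))))
--     return result
-- ===== Notes on version B (the rewrite author's own statement) =====
-- stated objective: alternative
-- what changed: Replaced the dict-accumulation-then-sort with: collect the distinct depths, sort them, and for each depth scan the input once tallying the four counters, so the result is built already in depth order with no dict and no final sort of pairs.
import Mathlib
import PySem

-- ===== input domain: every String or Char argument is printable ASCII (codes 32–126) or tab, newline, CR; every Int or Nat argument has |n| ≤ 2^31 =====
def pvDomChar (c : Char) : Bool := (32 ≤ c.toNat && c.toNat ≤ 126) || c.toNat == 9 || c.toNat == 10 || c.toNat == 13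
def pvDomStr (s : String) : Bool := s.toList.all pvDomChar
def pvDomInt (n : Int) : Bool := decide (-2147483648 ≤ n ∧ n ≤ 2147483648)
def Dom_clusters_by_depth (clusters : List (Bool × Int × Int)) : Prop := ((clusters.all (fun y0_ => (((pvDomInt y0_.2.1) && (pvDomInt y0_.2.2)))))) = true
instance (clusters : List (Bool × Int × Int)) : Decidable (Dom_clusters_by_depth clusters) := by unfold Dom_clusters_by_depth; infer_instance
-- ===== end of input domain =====

-- Header: B replaces A's dict accumulation + final sort by sorting the distinct depths first and
-- tallying each depth with a scan of the input (objective: alternative decomposition, same results).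

-- ===== PORT A =====
-- one iteration of A's 'for status, depth, cardinality in clusters' loop over the dict
def cbdStep (m : PySem.Dict Int ((Int × Int) × (Int × Int))) (c : Bool × Int × Int) :
    PySem.Dict Int ((Int × Int) × (Int × Int)) :=
  let v := m.getD c.2.1 ((0, 0), (0, 0))
  if c.1 then
    m.insert c.2.1 ((v.1.1, v.1.2), (v.2.1 + 1, v.2.2 + c.2.2))
  else
    m.insert c.2.1 ((v.1.1 + 1, v.1.2 + c.2.2), (v.2.1, v.2.2))

-- sorted(depth_counts.items()): dict keys are distinct, so Python's tuple comparison only ever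
-- decides on the first component; sorting by the key is exact here.
def clusters_by_depth (clusters : List (Bool × Int × Int)) :
    List (Int × ((Int × Int) × (Int × Int))) :=
  PySem.List.sorted ((clusters.foldl cbdStep PySem.Dict.empty).items) (fun p => p.1) false

-- ===== PORT B =====
-- B's inner loop: tally the four counters for one depth by scanning the clusters
def cbdTally (clusters : List (Bool × Int × Int)) (d : Int) : (Int × Int) × (Int × Int) :=
  clusters.foldl
    (fun acc c =>
      if c.2.1 = d then
        if c.1 then ((acc.1.1, acc.1.2), (acc.2.1 + 1, acc.2.2 + c.2.2))
        else ((acc.1.1 + 1, acc.1.2 + c.2.2), (acc.2.1, acc.2.2))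
      else acc)
    ((0, 0), (0, 0))

def clusters_by_depth_alt (clusters : List (Bool × Int × Int)) :
    List (Int × ((Int × Int) × (Int × Int))) :=
  let depths := PySem.List.sorted (PySem.Set.ofList (clusters.map (fun c => c.2.1))) (fun x => x) false
  depths.map (fun d => (d, cbdTally clusters d))

-- ===== PRECONDITION & SPEC =====
def Spec_clusters_by_depth (clusters : List (Bool × Int × Int)) (out : List (Int × ((Int × Int) × (Int × Int)))) : Prop := out = clusters_by_depth_alt clusters
instance (clusters : List (Bool × Int × Int)) (out : List (Int × ((Int × Int) × (Int × Int)))) : Decidable (Spec_clusters_by_depth clusters out) := by unfold Spec_clusters_by_depth; infer_instance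

-- ===== CLAIM (what is proved, stated in full; the proofs are below) =====
def Claim_equal_clusters_by_depth : Prop := ∀ (clusters : List (Bool × Int × Int)), Dom_clusters_by_depth clusters → Spec_clusters_by_depth clusters (clusters_by_depth clusters)

-- ===== LEMMAS AND PROOFS =====

theorem cbd_getD (clusters : List (Bool × Int × Int))
    (m : PySem.Dict Int ((Int × Int) × (Int × Int))) (d : Int) :
    (clusters.foldl cbdStep m).getD d ((0, 0), (0, 0)) =
      clusters.foldl
        (fun acc c =>
          if c.2.1 = d then
            if c.1 then ((acc.1.1, acc.1.2), (acc.2.1 + 1, acc.2.2 + c.2.2))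
            else ((acc.1.1 + 1, acc.1.2 + c.2.2), (acc.2.1, acc.2.2))
          else acc)
        (m.getD d ((0, 0), (0, 0))) := by
  induction clusters generalizing m with
  | nil => rfl
  | cons c cs ih =>
      simp only [List.foldl_cons, ih]
      congr 1
      by_cases h : c.2.1 = d
      · subst h
        cases hc : c.1 <;> simp [cbdStep, hc]
      · cases hc : c.1 <;>
          simp [cbdStep, hc, PySem.Dict.getD_insert, h,
            show ¬ (d = c.2.1) from fun he => h he.symm]

theorem cbd_keys (clusters : List (Bool × Int × Int))
    (m : PySem.Dict Int ((Int × Int) × (Int × Int))) :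
    (clusters.foldl cbdStep m).keys =
      (clusters.map (fun c => c.2.1)).foldl PySem.Set.add m.keys := by
  induction clusters generalizing m with
  | nil => rfl
  | cons c cs ih =>
      simp only [List.foldl_cons, List.map_cons, ih]
      congr 1
      have hmem : m.contains c.2.1 = true ↔ c.2.1 ∈ m.keys := by
        simp [PySem.Dict.contains, PySem.Dict.keys, List.any_eq_true, List.mem_map]
      by_cases h : m.contains c.2.1 = true
      · have hk : c.2.1 ∈ m.keys := hmem.mp h
        cases hc : c.1 <;>
          simp [cbdStep, hc, PySem.Dict.keys_insert_of_contains _ _ h, PySem.Set.add,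
            PySem.Set.contains, hk]
      · have h' : m.contains c.2.1 = false := by simpa using h
        have hk : c.2.1 ∉ m.keys := fun hx => h (hmem.mpr hx)
        cases hc : c.1 <;>
          simp [cbdStep, hc, PySem.Dict.keys_insert_of_not_contains _ _ h', PySem.Set.add,
            PySem.Set.contains, hk]

theorem cbd_nodup_keys (clusters : List (Bool × Int × Int))
    (m : PySem.Dict Int ((Int × Int) × (Int × Int))) (hm : m.keys.Nodup) :
    (clusters.foldl cbdStep m).keys.Nodup := by
  induction clusters generalizing m with
  | nil => exact hm
  | cons c cs ih =>
      refine ih _ ?_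
      unfold cbdStep
      split <;> exact PySem.Dict.nodup_keys_insert _ _ _ hm

theorem items_eq_keys_map {ν : Type} (l : List (Int × ν)) (d0 : ν)
    (h : ∀ p ∈ l, (PySem.Dict.mk l).getD p.1 d0 = p.2) :
    l = (l.map Prod.fst).map (fun k => (k, (PySem.Dict.mk l).getD k d0)) := by
  have : ∀ p ∈ l, (fun k => (k, (PySem.Dict.mk l).getD k d0)) p.1 = p := by
    intro p hp
    have := h p hp
    simp [this]
  calc l = l.map id := by simp
    _ = l.map ((fun k => (k, (PySem.Dict.mk l).getD k d0)) ∘ Prod.fst) := by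
        apply List.map_congr_left
        intro p hp
        simpa using (this p hp).symm
    _ = (l.map Prod.fst).map (fun k => (k, (PySem.Dict.mk l).getD k d0)) := by
        rw [List.map_map]

theorem dict_items_eq (D : PySem.Dict Int ((Int × Int) × (Int × Int)))
    (hnd : D.keys.Nodup) :
    D.items = D.keys.map (fun k => (k, D.getD k ((0, 0), (0, 0)))) := by
  have h : ∀ p ∈ D.items, D.getD p.1 ((0, 0), (0, 0)) = p.2 := by
    intro p hp
    have := PySem.Dict.get?_of_mem_items D (k := p.1) (v := p.2) (by simpa using hp) hnd
    simp [PySem.Dict.getD, this]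
  have := items_eq_keys_map D.items ((0, 0), (0, 0)) (by
      intro p hp
      exact h p hp)
  cases D with
  | mk l => simpa [PySem.Dict.keys, PySem.Dict.items] using this

-- ===== VERDICT (by name: the statement is the Claim_ definition above) =====
theorem clusters_by_depth_spec : Claim_equal_clusters_by_depth := by
  intro clusters _
  unfold Spec_clusters_by_depth clusters_by_depth clusters_by_depth_alt
  set D := clusters.foldl cbdStep PySem.Dict.empty with hD
  have hnd : D.keys.Nodup := cbd_nodup_keys clusters _ (by simp [PySem.Dict.keys_empty])
  have hkeys : D.keys = PySem.Set.ofList (clusters.map (fun c => c.2.1)) := by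
    rw [hD, cbd_keys]
    simp [PySem.Set.ofList_eq_foldl, PySem.Dict.keys_empty]
  have hfun : (fun d => (d, cbdTally clusters d)) =
      (fun k : Int => (k, D.getD k ((0, 0), (0, 0)))) := by
    funext d
    rw [hD, cbd_getD]
    simp [cbdTally, PySem.Dict.getD_empty]
  show PySem.List.sorted D.items (fun p => p.1) false =
    (PySem.List.sorted (PySem.Set.ofList (clusters.map (fun c => c.2.1))) (fun x => x) false).map
      (fun d => (d, cbdTally clusters d))
  apply PySem.List.sorted_eq_of_perm_of_pairwise_lt
  · rw [hfun, dict_items_eq D hnd, ← hkeys]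
    exact List.Perm.map _ (PySem.List.sorted_perm _ _ _)
  · have hlt := PySem.List.sorted_ofList_pairwise_lt (clusters.map (fun c => c.2.1))
    exact List.Pairwise.map _ (fun a b h => h) hlt
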